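-- pv_equiv track=rewrite | github.com/HwiNyeonKim/algorithm-2025 | dynamic_programming/n_으로_표현.py | solution
-- ===== SOURCE A (Python) =====
-- import operator
-- from itertools import product
--
-- operations = [operator.add, operator.sub, operator.mul, operator.floordiv]
--
-- def solution(n, target_number):
--     if n == target_number:
--         return 1
--
--     # n 을 i개 사용해서 만들 수 있는 경우의 수
--     # - n을 i번 반복
--     # - n을 (i - j)번 반복해서 만들 수 있는 경우의 수와 j번 반복해서 만들수 있는 경우의 수의 사칙연산
--     dp = [set([int(str(n) * i)]) for i in range(1, 9)]
--     dp.insert(0, set())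
--
--     for i in range(2, 9):
--         for j in range(1, i):
--             cartesian_product = product(dp[i - j], dp[j])
--
--             for left, right in cartesian_product:
--                 for operation in operations:
--                     try:
--                         number = operation(left, right)
--                     except ZeroDivisionError:
--                         continue
--
--                     dp[i].add(number)
--
--         if target_number in dp[i]:
--             return i
--
--     return -1
-- ===== SOURCE B (Python) =====
-- from functools import lru_cache
--
-- def solution(n, target_number):
--     if n == target_number:
--         return 1
--
--     @lru_cache(maxsize=None)
--     def make(i):
--         # set of values expressible using the block str(n) exactly i times
--         values = {int(str(n) * i)}
--         for j in range(1, i):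
--             for left in make(i - j):
--                 for right in make(j):
--                     values.add(left + right)
--                     values.add(left - right)
--                     values.add(left * right)
--                     if right != 0:
--                         values.add(left // right)
--         return frozenset(values)
--
--     for i in range(2, 9):
--         if target_number in make(i):
--             return i
--     return -1
-- ===== Notes on version B (the rewrite author's own statement) =====
-- stated objective: alternative
-- what changed: Replaces A's mutable 9-entry dp table, itertools.product and the operator-list/try-except loop with a memoized recursive make(i) helper using plain nested loops and an explicit zero-divisor guard, scanning counts ascending.
-- outside the precondition, e.g. on solution(-3, 7): A raises ValueError, B raises ValueError
import Mathlib
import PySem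

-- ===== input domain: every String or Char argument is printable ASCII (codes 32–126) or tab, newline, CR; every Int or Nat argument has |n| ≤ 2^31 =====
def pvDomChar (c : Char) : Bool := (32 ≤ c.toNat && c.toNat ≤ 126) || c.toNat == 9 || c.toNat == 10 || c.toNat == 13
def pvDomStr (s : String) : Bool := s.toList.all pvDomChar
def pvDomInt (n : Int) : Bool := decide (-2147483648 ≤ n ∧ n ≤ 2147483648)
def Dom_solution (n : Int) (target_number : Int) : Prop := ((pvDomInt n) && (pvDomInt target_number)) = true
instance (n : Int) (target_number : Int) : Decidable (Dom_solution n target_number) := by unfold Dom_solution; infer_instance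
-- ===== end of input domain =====

-- B replaces A's mutable dp table + itertools.product + operator-list/try-except with a
-- memoized recursive make(i) using nested loops and an explicit zero-divisor guard (alternative
-- decomposition, same cost). Return-value equivalence only; neither mutates its arguments.

-- ===== PORT A =====
-- int(str(n) * i); the `.getD 0` default is the ValueError case (n < 0, i ≥ 2), excluded by Pre_.
def pvRep (n : Int) (i : Nat) : Int :=
  (PySem.Int.ofStr? (String.join (List.replicate i (PySem.Int.toStr n)))).getD 0

-- the module-level list `operations` of the four operator functions, as tags
inductive PvOp
  | add | sub | mul | fdiv
deriving DecidableEq, Repr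

def pvOperations : List PvOp := [.add, .sub, .mul, .fdiv]

-- operation(left, right); none = ZeroDivisionError (only floordiv with right 0 raises)
def pvApply? (op : PvOp) (l r : Int) : Option Int :=
  match op with
  | .add => some (l + r)
  | .sub => some (l - r)
  | .mul => some (l * r)
  | .fdiv => if r = 0 then none else some (PySem.Int.floordiv l r)

-- `for operation in operations: try … except ZeroDivisionError: continue; dp[i].add(number)`
def pvOpLoop (s : PySem.Set Int) (l r : Int) : PySem.Set Int :=
  pvOperations.foldl
    (fun s op =>
      match pvApply? op l r with
      | none => s
      | some number => PySem.Set.add s number) s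

-- one j-iteration: fold `product(dp[i-j], dp[j])` (pair list) into dp[i]
def pvStepJ (dp : List (PySem.Set Int)) (i j : Nat) (si : PySem.Set Int) : PySem.Set Int :=
  ((dp.getD (i - j) []).flatMap (fun l => (dp.getD j []).map (fun r => (l, r)))).foldl
    (fun s p => pvOpLoop s p.1 p.2) si

-- the whole `for j in range(1, i)` loop, producing the final dp[i]
def pvBuildI (dp : List (PySem.Set Int)) (i : Nat) : PySem.Set Int :=
  (List.range' 1 (i - 1)).foldl (fun si j => pvStepJ dp i j si) (dp.getD i [])

-- `for i in range(2, 9): … if target_number in dp[i]: return i` / `return -1`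
def pvLoopA (target : Int) (dp : List (PySem.Set Int)) : List Nat → Int
  | [] => -1
  | i :: rest =>
    let dp' := dp.set i (pvBuildI dp i)
    if PySem.Set.contains (dp'.getD i []) target then (i : Int)
    else pvLoopA target dp' rest

def solution (n : Int) (target_number : Int) : Int :=
  if n = target_number then 1
  else
    pvLoopA target_number
      (PySem.Set.ofList [] ::
        (List.range' 1 8).map (fun i => PySem.Set.ofList [pvRep n i]))
      (List.range' 2 7)

-- ===== PORT B =====
-- memoized recursive make(i): base {int(str(n)*i)}, then for each split j the nested loops
-- over make(i-j) × make(j) with the four operations, guarding the zero divisor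
def pvMake (n : Int) : Nat → PySem.Set Int
  | i =>
    (List.range' 1 (i - 1)).attach.foldl
      (fun values j =>
        (pvMake n (i - j.1)).foldl
          (fun values l =>
            (pvMake n j.1).foldl
              (fun values r =>
                let values := PySem.Set.add values (l + r)
                let values := PySem.Set.add values (l - r)
                let values := PySem.Set.add values (l * r)
                if r = 0 then values
                else PySem.Set.add values (PySem.Int.floordiv l r))
              values)
          values)
      (PySem.Set.ofList [pvRep n i])
  termination_by i => i
  decreasing_by
    all_goals
      have := j.2
      simp only [List.mem_range'_1] at this
      omega

-- `for i in range(2, 9): if target_number in make(i): return i` / `return -1`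
def pvScanB (n target : Int) : List Nat → Int
  | [] => -1
  | i :: rest =>
    if PySem.Set.contains (pvMake n i) target then (i : Int)
    else pvScanB n target rest

def solution_alt (n : Int) (target_number : Int) : Int :=
  if n = target_number then 1
  else pvScanB n target_number (List.range' 2 7)

-- ===== PRECONDITION & SPEC =====
-- Pre_ excludes n < 0 with n ≠ target_number: there Python's int(str(n) * i) raises
-- ValueError for i ≥ 2 (e.g. int('-3-3')), in A and in B alike, so A returns on exactly Pre_.
def Pre_solution (n : Int) (target_number : Int) : Prop :=
  n = target_number ∨ 0 ≤ n
instance (n : Int) (target_number : Int) : Decidable (Pre_solution n target_number) := by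
  unfold Pre_solution; infer_instance

def pvWitness_solution : Int × Int := (5, 12)

def Spec_solution (n : Int) (target_number : Int) (out : Int) : Prop := out = solution_alt n target_number
instance (n : Int) (target_number : Int) (out : Int) : Decidable (Spec_solution n target_number out) := by unfold Spec_solution; infer_instance

-- ===== CLAIM (what is proved, stated in full; the proofs are below) =====
def Claim_equal_solution : Prop := ∀ (n : Int) (target_number : Int), Dom_solution n target_number → Pre_solution n target_number → Spec_solution n target_number (solution n target_number)

-- ===== LEMMAS AND PROOFS =====

-- the dp invariant: entries already processed hold make(k), the rest their initial singleton
def pvInv (n : Int) (dp : List (PySem.Set Int)) (i : Nat) : Prop :=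
  dp.length = 9 ∧
  (∀ k, 1 ≤ k → k < i → dp.getD k [] = pvMake n k) ∧
  (∀ k, i ≤ k → k ≤ 8 → dp.getD k [] = PySem.Set.ofList [pvRep n k])

theorem pvGetDSetSelf {α : Type} (l : List α) (i : Nat) (a : α) (d : α) (h : i < l.length) :
    (l.set i a).getD i d = a := by
  simp [List.getD, h]

theorem pvGetDSetNe {α : Type} (l : List α) (i k : Nat) (a : α) (d : α) (h : k ≠ i) :
    (l.set i a).getD k d = l.getD k d := by
  simp [List.getD, List.getElem?_set_ne (Ne.symm h)]

-- folding over the cartesian-product pair list = the two nested folds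
theorem pvFoldPairs {α β : Type} (xs ys : List α) (f : β → α → α → β) (s : β) :
    (xs.flatMap (fun l => ys.map (fun r => (l, r)))).foldl (fun s p => f s p.1 p.2) s
      = xs.foldl (fun s l => ys.foldl (fun s r => f s l r) s) s := by
  induction xs generalizing s with
  | nil => rfl
  | cons l xs ih =>
    simp only [List.flatMap_cons, List.foldl_append, List.foldl_cons, List.foldl_map, ih]

-- the operator-list loop with the ZeroDivisionError skip = B's explicit four adds
theorem pvOpLoop_eq (s : PySem.Set Int) (l r : Int) :
    pvOpLoop s l r =
      (let s := PySem.Set.add s (l + r)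
       let s := PySem.Set.add s (l - r)
       let s := PySem.Set.add s (l * r)
       if r = 0 then s else PySem.Set.add s (PySem.Int.floordiv l r)) := by
  by_cases h : r = 0 <;> simp [pvOpLoop, pvOperations, pvApply?, h]

-- under the invariant, one pass of A's i-loop body builds exactly make(i)
theorem pvBuildI_eq (n : Int) (dp : List (PySem.Set Int)) (i : Nat)
    (h2 : 2 ≤ i) (h8 : i ≤ 8) (hinv : pvInv n dp i) :
    pvBuildI dp i = pvMake n i := by
  obtain ⟨-, hlt, hge⟩ := hinv
  rw [pvMake]
  rw [List.foldl_attach (l := List.range' 1 (i - 1))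
    (f := fun values j =>
      (pvMake n (i - j)).foldl
        (fun values l =>
          (pvMake n j).foldl
            (fun values r =>
              let values := PySem.Set.add values (l + r)
              let values := PySem.Set.add values (l - r)
              let values := PySem.Set.add values (l * r)
              if r = 0 then values
              else PySem.Set.add values (PySem.Int.floordiv l r))
            values)
        values)
    (b := PySem.Set.ofList [pvRep n i])]
  unfold pvBuildI
  rw [hge i le_rfl h8]
  apply PySem.List.foldl_congr_mem'
  intro j hj si
  rw [List.mem_range'_1] at hj
  unfold pvStepJ
  rw [hlt j hj.1 (by omega), hlt (i - j) (by omega) (by omega)]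
  rw [pvFoldPairs]
  apply PySem.List.foldl_congr_mem'
  intro l _ s₁
  apply PySem.List.foldl_congr_mem'
  intro r _ s₂
  exact pvOpLoop_eq s₂ l r

-- A's main loop agrees with B's scan as long as the invariant holds
theorem pvLoop_eq (n target : Int) :
    ∀ (m i : Nat) (dp : List (PySem.Set Int)), 2 ≤ i → i + m = 9 → pvInv n dp i →
      pvLoopA target dp (List.range' i m) = pvScanB n target (List.range' i m) := by
  intro m
  induction m with
  | zero => intro i dp _ _ _; rfl
  | succ m ih =>
    intro i dp h2 h9 hinv
    have hlen : dp.length = 9 := hinv.1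
    have hbuild : pvBuildI dp i = pvMake n i := pvBuildI_eq n dp i h2 (by omega) hinv
    rw [List.range'_succ]
    simp only [pvLoopA, pvScanB]
    have hget : (dp.set i (pvBuildI dp i)).getD i [] = pvMake n i := by
      rw [pvGetDSetSelf _ _ _ _ (by omega), hbuild]
    rw [hget]
    by_cases hmem : target ∈ pvMake n i
    · simp [hmem]
    · simp only [PySem.Set.contains_iff, hmem, if_false]
      apply ih (i + 1) _ (by omega) (by omega)
      refine ⟨by simp [hlen], ?_, ?_⟩
      · intro k hk1 hki
        by_cases hk : k = i
        · subst hk; exact hget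
        · rw [pvGetDSetNe _ _ _ _ _ hk]
          exact hinv.2.1 k hk1 (by omega)
      · intro k hk1 hk8
        rw [pvGetDSetNe _ _ _ _ _ (by omega)]
        exact hinv.2.2 k (by omega) hk8

-- the initial dp satisfies the invariant at i = 2
theorem pvInit_inv (n : Int) :
    pvInv n
      (PySem.Set.ofList [] ::
        (List.range' 1 8).map (fun i => PySem.Set.ofList [pvRep n i])) 2 := by
  refine ⟨by simp [List.range'], ?_, ?_⟩
  · intro k hk1 hk2
    have hk : k = 1 := by omega
    subst hk
    rw [pvMake]
    simp [List.range']
  · intro k hk2 hk8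
    interval_cases k <;> simp [List.range']

-- ===== VERDICT (by name: the statement is the Claim_ definition above) =====
theorem solution_spec : Claim_equal_solution := by
  intro n target_number _ _
  unfold Spec_solution solution solution_alt
  by_cases h : n = target_number
  · simp [h]
  · simp only [h, if_false]

    exact pvLoop_eq n target_number 7 2 _ (by norm_num) (by norm_num) (pvInit_inv n)
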